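-- pv_equiv track=rewrite | github.com/cnmasami/leetcode | code/1_bit_and_2_bit_characters.py | oneBitAnd2bitCharacters
-- ===== SOURCE A (Python) =====
-- def oneBitAnd2bitCharacters(bits):
--     i = 0
--     while i < len(bits):
--         if i == len(bits) - 1:
--             return True
--         if bits[i] == 1:
--             i += 2
--         else:
--             i += 1
--
--     return False
-- ===== SOURCE B (Python) =====
-- def oneBitAnd2bitCharacters(bits):
--     if not bits:
--         return False
--     cnt = 0
--     i = len(bits) - 2
--     while i >= 0 and bits[i] == 1:
--         cnt += 1
--         i -= 1
--     return cnt % 2 == 0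
-- ===== Notes on version B (the rewrite author's own statement) =====
-- stated objective: faster
-- what changed: Replaces A's forward parse simulation (stepping 1 or 2 through the whole string) with a single backward scan that counts the run of 1-bits immediately before the last element and returns whether that count is even.
import Mathlib
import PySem

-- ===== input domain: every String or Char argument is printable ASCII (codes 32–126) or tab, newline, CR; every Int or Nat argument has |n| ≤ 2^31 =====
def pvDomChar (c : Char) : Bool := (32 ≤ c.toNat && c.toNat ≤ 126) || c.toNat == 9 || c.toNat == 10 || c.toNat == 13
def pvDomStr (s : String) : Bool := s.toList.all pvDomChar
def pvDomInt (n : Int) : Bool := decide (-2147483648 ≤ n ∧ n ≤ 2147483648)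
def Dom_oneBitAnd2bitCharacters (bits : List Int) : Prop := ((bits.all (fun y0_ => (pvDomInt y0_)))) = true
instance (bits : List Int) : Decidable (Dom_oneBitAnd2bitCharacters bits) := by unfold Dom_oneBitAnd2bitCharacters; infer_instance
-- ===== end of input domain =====

-- B replaces A's forward parse simulation with a backward scan counting the run of
-- 1-bits before the last element and returning its parity (objective: alternative).

-- ===== PORT A =====
-- A's while loop: i starts at 0; steps by 2 on a 1-bit, else by 1.
def pvLoopA (bits : List Int) (i : Nat) : Bool :=
  if _h : i < bits.length then
    if i = bits.length - 1 then true
    else if bits.getD i 0 = 1 then pvLoopA bits (i + 2)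
    else pvLoopA bits (i + 1)
  else false
termination_by bits.length - i
decreasing_by all_goals omega

def oneBitAnd2bitCharacters (bits : List Int) : Bool := pvLoopA bits 0

-- ===== PORT B =====
-- B's backward while loop (i = j-1 runs down from len-2 while bits[i] == 1).
def pvCountRun (bits : List Int) : Nat → Nat
  | 0 => 0
  | j + 1 => if bits.getD j 0 = 1 then pvCountRun bits j + 1 else 0

def oneBitAnd2bitCharacters_alt (bits : List Int) : Bool :=
  if bits.isEmpty then false
  else decide (pvCountRun bits (bits.length - 1) % 2 = 0)

-- ===== PRECONDITION & SPEC =====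
def Spec_oneBitAnd2bitCharacters (bits : List Int) (out : Bool) : Prop := out = oneBitAnd2bitCharacters_alt bits
instance (bits : List Int) (out : Bool) : Decidable (Spec_oneBitAnd2bitCharacters bits out) := by unfold Spec_oneBitAnd2bitCharacters; infer_instance

-- ===== CLAIM (what is proved, stated in full; the proofs are below) =====
def Claim_equal_oneBitAnd2bitCharacters : Prop := ∀ (bits : List Int), Dom_oneBitAnd2bitCharacters bits → Spec_oneBitAnd2bitCharacters bits (oneBitAnd2bitCharacters bits)

-- ===== LEMMAS AND PROOFS =====

lemma pvCountRun_le (bits : List Int) (j : Nat) : pvCountRun bits j ≤ j := by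
  induction j with
  | zero => simp [pvCountRun]
  | succ j ih => simp only [pvCountRun]; split <;> omega

-- every position inside the counted run holds a 1
lemma pvCountRun_mem (bits : List Int) (j : Nat) :
    ∀ k, k < pvCountRun bits j → bits.getD (j - 1 - k) 0 = 1 := by
  induction j with
  | zero => simp [pvCountRun]
  | succ j ih =>
    intro k hk
    simp only [pvCountRun] at hk
    split at hk
    · rename_i h1
      cases k with
      | zero => simpa using h1
      | succ k =>
        have h2 : j + 1 - 1 - (k + 1) = j - 1 - k := by omega
        rw [h2]; exact ih k (by omega)
    · omega

-- the bit just past the counted run (if any) is not a 1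
lemma pvCountRun_stop (bits : List Int) (j : Nat) (h : pvCountRun bits j < j) :
    bits.getD (j - 1 - pvCountRun bits j) 0 ≠ 1 := by
  induction j with
  | zero => omega
  | succ j ih =>
    simp only [pvCountRun] at h ⊢
    by_cases h1 : bits.getD j 0 = 1
    · rw [if_pos h1] at h ⊢
      have hlt : pvCountRun bits j < j := by omega
      have heq : j + 1 - 1 - (pvCountRun bits j + 1) = j - 1 - pvCountRun bits j := by omega
      rw [heq]; exact ih hlt
    · rw [if_neg h1] at h ⊢
      simpa using h1

lemma pvLoopA_end (bits : List Int) (i : Nat) (h : ¬ i < bits.length) :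
    pvLoopA bits i = false := by
  rw [pvLoopA]; simp [h]

lemma pvLoopA_eq (bits : List Int) :
    ∀ d i, bits ≠ [] → i ≤ bits.length - 1 → bits.length - 1 - i = d →
      pvLoopA bits i =
        decide (min (pvCountRun bits (bits.length - 1)) (bits.length - 1 - i) % 2 = 0) := by
  intro d
  induction d using Nat.strong_induction_on with
  | _ d ih =>
    intro i hne hi hd
    have hn : 1 ≤ bits.length := by
      cases bits with
      | nil => exact absurd rfl hne
      | cons a l => simp
    set n := bits.length with hnn
    set c := pvCountRun bits (n - 1) with hc
    have hcle : c ≤ n - 1 := pvCountRun_le bits (n - 1)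
    rw [pvLoopA]
    have hin : i < n := by omega
    rw [dif_pos hin]
    by_cases hlast : i = n - 1
    · rw [if_pos (show i = bits.length - 1 from hlast)]
      have h0 : n - 1 - i = 0 := by omega
      rw [h0]
      simp
    · rw [if_neg hlast]
      have hi2 : i < n - 1 := by omega
      by_cases hb : bits.getD i 0 = 1
      · simp only [hb, if_pos]
        -- c ≠ n - 2 - i: otherwise the stop position would be i yet bits[i] = 1
        have hcne : c ≠ n - 1 - i - 1 := by
          intro hceq
          have hlt : c < n - 1 := by omega
          have := pvCountRun_stop bits (n - 1) hlt
          rw [show n - 1 - 1 - c = i by omega] at this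
          exact this hb
        by_cases h2 : i + 2 ≤ n - 1
        · rw [ih (n - 1 - (i + 2)) (by omega) (i + 2) hne h2 rfl]
          simp only [decide_eq_decide]
          rcases Nat.lt_or_ge c (n - 1 - i) with hlt | hge
          · have : min c (n - 1 - i) = c := by omega
            have : min c (n - 1 - (i + 2)) = c := by omega
            omega
          · omega
        · -- i = n - 2: the jump lands past the end
          have : ¬ i + 2 < n := by omega
          rw [pvLoopA_end bits (i + 2) this]
          -- bits[n-2] = 1 so the run is nonempty: c ≥ 1
          have hc1 : 1 ≤ c := by
            rcases Nat.eq_zero_or_pos c with h0 | h1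
            · exfalso
              have hlt : c < n - 1 := by omega
              have := pvCountRun_stop bits (n - 1) hlt
              rw [show n - 1 - 1 - c = i by omega] at this
              exact this hb
            · exact h1
          have : min c (n - 1 - i) = 1 := by omega
          simp [this]
      · simp only [hb, if_false]
        have h1 : i + 1 ≤ n - 1 := by omega
        rw [ih (n - 1 - (i + 1)) (by omega) (i + 1) hne h1 rfl]
        simp only [decide_eq_decide]
        -- the run cannot reach position i, since bits[i] ≠ 1
        have hcle2 : c ≤ n - 1 - i - 1 := by
          by_contra hgt
          have hk : n - 1 - i - 1 < c := by omega
          have := pvCountRun_mem bits (n - 1) (n - 1 - i - 1) hk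
          rw [show n - 1 - 1 - (n - 1 - i - 1) = i by omega] at this
          exact hb this
        omega

-- ===== VERDICT (by name: the statement is the Claim_ definition above) =====
theorem oneBitAnd2bitCharacters_spec : Claim_equal_oneBitAnd2bitCharacters := by
  intro bits _
  unfold Spec_oneBitAnd2bitCharacters oneBitAnd2bitCharacters oneBitAnd2bitCharacters_alt
  cases bits with
  | nil => simp [pvLoopA_end]
  | cons a l =>
    have hne : (a :: l) ≠ ([] : List Int) := by simp
    rw [pvLoopA_eq (a :: l) ((a :: l).length - 1 - 0) 0 hne (by omega) rfl]
    have hcle := pvCountRun_le (a :: l) ((a :: l).length - 1)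
    have hmin : min (pvCountRun (a :: l) ((a :: l).length - 1)) ((a :: l).length - 1 - 0) =
        pvCountRun (a :: l) ((a :: l).length - 1) := by omega
    rw [hmin]
    simp
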